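-- pv_equiv track=rewrite | github.com/likhith1253/Loopy_SimonTatham_Games | tests/test_dp_solver.py | _build_full_clues
-- ===== SOURCE A (Python) =====
-- def _build_full_clues(rows, cols, solution_edges):
--     clues = {}
--     for r in range(rows):
--         for c in range(cols):
--             count = 0
--             if tuple(sorted(((r, c), (r, c + 1)))) in solution_edges:
--                 count += 1
--             if tuple(sorted(((r + 1, c), (r + 1, c + 1)))) in solution_edges:
--                 count += 1
--             if tuple(sorted(((r, c), (r + 1, c)))) in solution_edges:
--                 count += 1
--             if tuple(sorted(((r, c + 1), (r + 1, c + 1)))) in solution_edges: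
--                 count += 1
--             clues[(r, c)] = count
--     return clues
-- ===== SOURCE B (Python) =====
-- def _build_full_clues(rows, cols, solution_edges):
--     clues = {(r, c): 0 for r in range(rows) for c in range(cols)}
--     for edge in dict.fromkeys(solution_edges):
--         (r1, c1), (r2, c2) = edge
--         if r1 == r2 and c2 == c1 + 1:
--             cells = ((r1, c1), (r1 - 1, c1))
--         elif c1 == c2 and r2 == r1 + 1:
--             cells = ((r1, c1), (r1, c1 - 1))
--         else:
--             continue
--         for (i, j) in cells:
--             if 0 <= i < rows and 0 <= j < cols:
--                 clues[(i, j)] += 1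
--     return clues
-- ===== Notes on version B (the rewrite author's own statement) =====
-- stated objective: alternative
-- what changed: A scans the whole edge list four times for every grid cell; B zero-initialises the clue dict once and makes a single pass over the deduplicated edges, incrementing the one or two in-range cells each unit edge borders.
import Mathlib
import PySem

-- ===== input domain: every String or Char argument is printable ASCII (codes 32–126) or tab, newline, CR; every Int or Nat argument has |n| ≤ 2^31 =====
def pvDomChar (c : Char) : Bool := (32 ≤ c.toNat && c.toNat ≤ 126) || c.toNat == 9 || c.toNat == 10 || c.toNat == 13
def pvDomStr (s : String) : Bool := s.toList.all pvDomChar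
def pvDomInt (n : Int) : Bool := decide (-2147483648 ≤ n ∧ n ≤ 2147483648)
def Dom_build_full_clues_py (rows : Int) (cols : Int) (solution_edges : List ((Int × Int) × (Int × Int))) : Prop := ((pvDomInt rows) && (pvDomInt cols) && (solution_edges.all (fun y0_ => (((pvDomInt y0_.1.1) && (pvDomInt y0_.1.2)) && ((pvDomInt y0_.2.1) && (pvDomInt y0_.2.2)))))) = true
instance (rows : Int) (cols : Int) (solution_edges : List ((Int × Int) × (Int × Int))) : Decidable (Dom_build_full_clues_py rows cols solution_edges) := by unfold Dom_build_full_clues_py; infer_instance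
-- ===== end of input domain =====

-- B replaces A's four per-cell membership scans of the edge list by a single pass over the
-- deduplicated edges that increments the one or two in-range cells each unit edge borders.

-- ===== PORT A =====
-- tuple(sorted((a, b))) for two (int, int) tuples: Python's lexicographic tuple order
def pvSortPair (a : Int × Int) (b : Int × Int) : (Int × Int) × (Int × Int) :=
  if a.1 < b.1 ∨ (a.1 = b.1 ∧ a.2 ≤ b.2) then (a, b) else (b, a)

def build_full_clues_py (rows : Int) (cols : Int) (solution_edges : List ((Int × Int) × (Int × Int))) : List (Int × Int × Int) :=
  let clues : PySem.Dict (Int × Int) Int :=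
    (PySem.List.pyRange 0 rows 1).foldl (fun clues r =>
      (PySem.List.pyRange 0 cols 1).foldl (fun clues c =>
        let count : Int := 0
        let count := if pvSortPair (r, c) (r, c + 1) ∈ solution_edges then count + 1 else count
        let count := if pvSortPair (r + 1, c) (r + 1, c + 1) ∈ solution_edges then count + 1 else count
        let count := if pvSortPair (r, c) (r + 1, c) ∈ solution_edges then count + 1 else count
        let count := if pvSortPair (r, c + 1) (r + 1, c + 1) ∈ solution_edges then count + 1 else count
        clues.insert (r, c) count) clues) PySem.Dict.empty
  clues.items.map (fun p => (p.1.1, p.1.2, p.2))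

-- ===== PORT B =====
-- 'if 0 <= i < rows and 0 <= j < cols: clues[(i, j)] += 1' (the key is present, so += is modify)
def pvBump (rows : Int) (cols : Int) (d : PySem.Dict (Int × Int) Int) (cell : Int × Int) : PySem.Dict (Int × Int) Int :=
  if 0 ≤ cell.1 ∧ cell.1 < rows ∧ 0 ≤ cell.2 ∧ cell.2 < cols then d.modify cell 0 (· + 1) else d

def build_full_clues_py_alt (rows : Int) (cols : Int) (solution_edges : List ((Int × Int) × (Int × Int))) : List (Int × Int × Int) :=
  let clues : PySem.Dict (Int × Int) Int :=
    (PySem.List.pyRange 0 rows 1).foldl (fun d r =>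
      (PySem.List.pyRange 0 cols 1).foldl (fun d c => d.insert (r, c) 0) d) PySem.Dict.empty
  let clues :=
    (PySem.List.dedup solution_edges).foldl (fun d e =>
      if e.1.1 = e.2.1 ∧ e.2.2 = e.1.2 + 1 then
        [(e.1.1, e.1.2), (e.1.1 - 1, e.1.2)].foldl (pvBump rows cols) d
      else if e.1.2 = e.2.2 ∧ e.2.1 = e.1.1 + 1 then
        [(e.1.1, e.1.2), (e.1.1, e.1.2 - 1)].foldl (pvBump rows cols) d
      else d) clues
  clues.items.map (fun p => (p.1.1, p.1.2, p.2))

-- ===== PRECONDITION & SPEC =====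
def Spec_build_full_clues_py (rows : Int) (cols : Int) (solution_edges : List ((Int × Int) × (Int × Int))) (out : List (Int × Int × Int)) : Prop := out = build_full_clues_py_alt rows cols solution_edges
instance (rows : Int) (cols : Int) (solution_edges : List ((Int × Int) × (Int × Int))) (out : List (Int × Int × Int)) : Decidable (Spec_build_full_clues_py rows cols solution_edges out) := by unfold Spec_build_full_clues_py; infer_instance

-- ===== CLAIM (what is proved, stated in full; the proofs are below) =====
def Claim_equal_build_full_clues_py : Prop := ∀ (rows : Int) (cols : Int) (solution_edges : List ((Int × Int) × (Int × Int))), Dom_build_full_clues_py rows cols solution_edges → Spec_build_full_clues_py rows cols solution_edges (build_full_clues_py rows cols solution_edges)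

-- ===== LEMMAS AND PROOFS =====

-- the cells (r, c) in the row-major order both dicts are keyed by
def pvCells (rows : Int) (cols : Int) : List (Int × Int) :=
  (PySem.List.pyRange 0 rows 1).flatMap (fun r => (PySem.List.pyRange 0 cols 1).map (fun c => (r, c)))

-- A's per-cell count, the four membership tests
def pvCountA (E : List ((Int × Int) × (Int × Int))) (r : Int) (c : Int) : Int :=
  (if ((r, c), (r, c + 1)) ∈ E then 1 else 0) + (if ((r + 1, c), (r + 1, c + 1)) ∈ E then 1 else 0)
  + (if ((r, c), (r + 1, c)) ∈ E then 1 else 0) + (if ((r, c + 1), (r + 1, c + 1)) ∈ E then 1 else 0)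

-- the in-range bordering cells of one deduplicated edge, as B computes them
def pvIn (rows : Int) (cols : Int) (p : Int × Int) : Bool :=
  decide (0 ≤ p.1 ∧ p.1 < rows ∧ 0 ≤ p.2 ∧ p.2 < cols)

def pvRaw (e : (Int × Int) × (Int × Int)) : List (Int × Int) :=
  if e.1.1 = e.2.1 ∧ e.2.2 = e.1.2 + 1 then [(e.1.1, e.1.2), (e.1.1 - 1, e.1.2)]
  else if e.1.2 = e.2.2 ∧ e.2.1 = e.1.1 + 1 then [(e.1.1, e.1.2), (e.1.1, e.1.2 - 1)]
  else []

def pvTargets (rows : Int) (cols : Int) (E : List ((Int × Int) × (Int × Int))) : List (Int × Int) :=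
  (PySem.List.dedup E).flatMap (fun e => (pvRaw e).filter (pvIn rows cols))

lemma pvNodup_cells (rows cols : Int) : (pvCells rows cols).Nodup := by
  have h : pvCells rows cols = (PySem.List.pyRange 0 rows 1) ×ˢ (PySem.List.pyRange 0 cols 1) := rfl
  rw [h]
  exact List.Nodup.product (PySem.List.nodup_pyRange_one 0 rows) (PySem.List.nodup_pyRange_one 0 cols)

lemma pvMem_cells (rows cols : Int) (p : Int × Int) :
    p ∈ pvCells rows cols ↔ 0 ≤ p.1 ∧ p.1 < rows ∧ 0 ≤ p.2 ∧ p.2 < cols := by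
  obtain ⟨r, c⟩ := p
  simp [pvCells, PySem.List.mem_pyRange_one, and_assoc]

lemma pvSortPair_h (r c : Int) : pvSortPair (r, c) (r, c + 1) = ((r, c), (r, c + 1)) := by
  simp [pvSortPair]

lemma pvSortPair_v (r c : Int) : pvSortPair (r, c) (r + 1, c) = ((r, c), (r + 1, c)) := by
  simp [pvSortPair]

lemma pvA_eq (rows cols : Int) (E : List ((Int × Int) × (Int × Int))) :
    build_full_clues_py rows cols E
      = (pvCells rows cols).map (fun p => (p.1, p.2, pvCountA E p.1 p.2)) := by
  have hfold :
      (PySem.List.pyRange 0 rows 1).foldl (fun clues r =>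
        (PySem.List.pyRange 0 cols 1).foldl (fun clues c =>
          let count : Int := 0
          let count := if pvSortPair (r, c) (r, c + 1) ∈ E then count + 1 else count
          let count := if pvSortPair (r + 1, c) (r + 1, c + 1) ∈ E then count + 1 else count
          let count := if pvSortPair (r, c) (r + 1, c) ∈ E then count + 1 else count
          let count := if pvSortPair (r, c + 1) (r + 1, c + 1) ∈ E then count + 1 else count
          clues.insert (r, c) count) clues)
        (PySem.Dict.empty : PySem.Dict (Int × Int) Int)
      = (pvCells rows cols).foldl (fun d p => d.insert p (pvCountA E p.1 p.2)) PySem.Dict.empty := by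
    rw [pvCells, List.foldl_flatMap]
    simp only [List.foldl_map]
    congr 1
    funext d r
    congr 1
    funext d' c
    show d'.insert (r, c) _ = d'.insert (r, c) _
    congr 1
    simp only [pvSortPair_h, pvSortPair_v, pvCountA]
    split_ifs <;> omega
  show ((PySem.List.pyRange 0 rows 1).foldl _ (PySem.Dict.empty : PySem.Dict (Int × Int) Int)).items.map _ = _
  rw [hfold]
  rw [PySem.Dict.items_foldl_insert_fresh (pvCells rows cols) (fun p => p) (fun p => pvCountA E p.1 p.2)
        PySem.Dict.empty (fun a _ => by simp) (by simpa using pvNodup_cells rows cols)]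
  simp [PySem.Dict.empty, Function.comp_def]

lemma pvSet_update_self (s : PySem.Set (Int × Int)) (xs : List (Int × Int))
    (h : ∀ x ∈ xs, x ∈ s) : PySem.Set.update s xs = s := by
  simp only [PySem.Set.update]
  induction xs generalizing s with
  | nil => rfl
  | cons x xs ih =>
      rw [List.foldl_cons]
      have hx : PySem.Set.add s x = s := by
        simp [PySem.Set.add, PySem.Set.contains, h x (by simp)]
      rw [hx]
      exact ih s (fun y hy => h y (by simp [hy]))

lemma pvTargets_mem (rows cols : Int) (E : List ((Int × Int) × (Int × Int))) (t : Int × Int)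
    (ht : t ∈ pvTargets rows cols E) : t ∈ pvCells rows cols := by
  rw [pvTargets] at ht
  rw [List.mem_flatMap] at ht
  obtain ⟨e, -, hmem⟩ := ht
  rw [List.mem_filter] at hmem
  rw [pvMem_cells]
  simpa [pvIn] using hmem.2

lemma pvB_eq (rows cols : Int) (E : List ((Int × Int) × (Int × Int))) :
    build_full_clues_py_alt rows cols E
      = (pvCells rows cols).map (fun p => (p.1, p.2, (0 : Int) + ((pvTargets rows cols E).count p : Int))) := by
  have hinit :
      (PySem.List.pyRange 0 rows 1).foldl (fun d r =>
        (PySem.List.pyRange 0 cols 1).foldl (fun d c => d.insert (r, c) (0 : Int)) d)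
        (PySem.Dict.empty : PySem.Dict (Int × Int) Int)
      = (pvCells rows cols).foldl (fun d p => d.insert p (0 : Int)) PySem.Dict.empty := by
    rw [pvCells, List.foldl_flatMap]
    simp only [List.foldl_map]
  have hitems0 :
      ((pvCells rows cols).foldl (fun d p => d.insert p (0 : Int)) PySem.Dict.empty).items
        = (pvCells rows cols).map (fun p => (p, (0 : Int))) := by
    rw [PySem.Dict.items_foldl_insert_fresh (pvCells rows cols) (fun p => p) (fun _ => (0 : Int))
          PySem.Dict.empty (fun a _ => by simp) (by simpa using pvNodup_cells rows cols)]
    simp [PySem.Dict.empty]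
  set clues0 : PySem.Dict (Int × Int) Int :=
    (pvCells rows cols).foldl (fun d p => d.insert p (0 : Int)) PySem.Dict.empty with hclues0
  have hkeys0 : clues0.keys = pvCells rows cols := by
    simp [PySem.Dict.keys, hitems0, List.map_map, Function.comp_def]
  have hloop :
      (PySem.List.dedup E).foldl (fun d e =>
        if e.1.1 = e.2.1 ∧ e.2.2 = e.1.2 + 1 then
          [(e.1.1, e.1.2), (e.1.1 - 1, e.1.2)].foldl (pvBump rows cols) d
        else if e.1.2 = e.2.2 ∧ e.2.1 = e.1.1 + 1 then
          [(e.1.1, e.1.2), (e.1.1, e.1.2 - 1)].foldl (pvBump rows cols) d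
        else d) clues0
      = (pvTargets rows cols E).foldl (fun d x => d.modify x 0 (fun v => v + 1)) clues0 := by
    rw [pvTargets, List.foldl_flatMap]
    congr 1
    funext d e
    rw [List.foldl_filter]
    by_cases h1 : e.1.1 = e.2.1 ∧ e.2.2 = e.1.2 + 1
    · simp only [pvRaw, if_pos h1, List.foldl_cons, List.foldl_nil, pvBump, pvIn,
        decide_eq_true_eq]
    · by_cases h2 : e.1.2 = e.2.2 ∧ e.2.1 = e.1.1 + 1
      · simp only [pvRaw, if_neg h1, if_pos h2, List.foldl_cons, List.foldl_nil, pvBump, pvIn,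
          decide_eq_true_eq]
      · simp only [pvRaw, if_neg h1, if_neg h2, List.foldl_nil]
  show ((PySem.List.dedup E).foldl _
      ((PySem.List.pyRange 0 rows 1).foldl _ (PySem.Dict.empty : PySem.Dict (Int × Int) Int))).items.map _ = _
  rw [hinit, hloop]
  have hkeysf :
      ((pvTargets rows cols E).foldl (fun d x => d.modify x 0 (fun v => v + 1)) clues0).keys
        = pvCells rows cols := by
    rw [PySem.Dict.keys_foldl_modify (pvTargets rows cols E) (0 : Int) (fun _ _ v => v + 1) clues0,
      hkeys0]
    exact pvSet_update_self _ _ (pvTargets_mem rows cols E)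
  rw [PySem.Dict.items_eq_map_keys _ (hkeysf ▸ pvNodup_cells rows cols) 0, hkeysf, List.map_map]
  refine List.map_congr_left (fun p hp => ?_)
  have hgd : clues0.getD p 0 = 0 := by
    have hmem : (p, (0 : Int)) ∈ clues0.items := by
      rw [hitems0]
      exact List.mem_map.mpr ⟨p, hp, rfl⟩
    exact PySem.Dict.getD_of_mem_items clues0 hmem (by rw [hkeys0]; exact pvNodup_cells rows cols) 0
  simp [PySem.Dict.getD_foldl_modify_add_one, hgd]

lemma pvCount_flatMap (l : List ((Int × Int) × (Int × Int)))
    (f : ((Int × Int) × (Int × Int)) → List (Int × Int)) (a : Int × Int) :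
    (l.flatMap f).count a = (l.map (fun e => (f e).count a)).sum := by
  induction l with
  | nil => simp
  | cons x xs ih => simp [List.count_append, ih]

lemma pvRaw_count (r c : Int) (e : (Int × Int) × (Int × Int)) :
    (pvRaw e).count (r, c)
      = if e = ((r, c), (r, c + 1)) ∨ e = ((r + 1, c), (r + 1, c + 1))
          ∨ e = ((r, c), (r + 1, c)) ∨ e = ((r, c + 1), (r + 1, c + 1)) then 1 else 0 := by
  obtain ⟨⟨a, b⟩, a', b'⟩ := e
  simp only [pvRaw]
  split_ifs <;> simp_all [List.count_cons, List.count_nil, Prod.ext_iff] <;>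
    first
    | omega
    | (split_ifs <;> omega)

lemma pvInd_or (e a b c d : (Int × Int) × (Int × Int)) (hab : a ≠ b) (hac : a ≠ c) (had : a ≠ d)
    (hbc : b ≠ c) (hbd : b ≠ d) (hcd : c ≠ d) :
    (if e = a ∨ e = b ∨ e = c ∨ e = d then (1 : Nat) else 0)
      = (if e = a then 1 else 0) + (if e = b then 1 else 0)
        + (if e = c then 1 else 0) + (if e = d then 1 else 0) := by
  split_ifs <;> simp_all

lemma pvSum_add (l : List ((Int × Int) × (Int × Int)))
    (f g : ((Int × Int) × (Int × Int)) → Nat) :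
    (l.map (fun e => f e + g e)).sum = (l.map f).sum + (l.map g).sum := by
  induction l with
  | nil => simp
  | cons x xs ih => simp [ih]; omega

lemma pvSum_ind_single (l : List ((Int × Int) × (Int × Int))) (hl : l.Nodup)
    (a : (Int × Int) × (Int × Int)) :
    (l.map (fun e => if e = a then (1 : Nat) else 0)).sum = if a ∈ l then 1 else 0 := by
  induction l with
  | nil => simp
  | cons x xs ih =>
      obtain ⟨hx, hnd⟩ := List.nodup_cons.mp hl
      rw [List.map_cons, List.sum_cons, ih hnd]
      by_cases hxa : x = a
      · subst hxa
        simp [hx]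
      · simp [hxa, Ne.symm hxa, List.mem_cons]

lemma pvCount_eq (rows cols : Int) (E : List ((Int × Int) × (Int × Int))) (p : Int × Int)
    (hp : p ∈ pvCells rows cols) :
    pvCountA E p.1 p.2 = (0 : Int) + ((pvTargets rows cols E).count p : Int) := by
  obtain ⟨r, c⟩ := p
  rw [pvMem_cells] at hp
  have hpin : pvIn rows cols (r, c) = true := by simpa [pvIn] using hp
  have hdistinct1 : ((r, c), (r, c + 1)) ≠ ((r + 1, c), (r + 1, c + 1)) := by
    simp [Prod.ext_iff]
  have hdistinct2 : ((r, c), (r, c + 1)) ≠ ((r, c), (r + 1, c)) := by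
    simp [Prod.ext_iff]
  have hdistinct3 : ((r, c), (r, c + 1)) ≠ ((r, c + 1), (r + 1, c + 1)) := by
    simp [Prod.ext_iff]
  have hdistinct4 : ((r + 1, c), (r + 1, c + 1)) ≠ ((r, c), (r + 1, c)) := by
    simp [Prod.ext_iff]
  have hdistinct5 : ((r + 1, c), (r + 1, c + 1)) ≠ ((r, c + 1), (r + 1, c + 1)) := by
    simp [Prod.ext_iff]
  have hdistinct6 : ((r, c), (r + 1, c)) ≠ ((r, c + 1), (r + 1, c + 1)) := by
    simp [Prod.ext_iff]
  have hcount :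
      (pvTargets rows cols E).count (r, c)
        = (if ((r, c), (r, c + 1)) ∈ E then 1 else 0)
          + (if ((r + 1, c), (r + 1, c + 1)) ∈ E then 1 else 0)
          + (if ((r, c), (r + 1, c)) ∈ E then 1 else 0)
          + (if ((r, c + 1), (r + 1, c + 1)) ∈ E then 1 else 0) := by
    rw [pvTargets, pvCount_flatMap]
    have hmapeq :
        (PySem.List.dedup E).map (fun e => ((pvRaw e).filter (pvIn rows cols)).count (r, c))
          = (PySem.List.dedup E).map (fun e =>
              (if e = ((r, c), (r, c + 1)) then (1 : Nat) else 0)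
              + (if e = ((r + 1, c), (r + 1, c + 1)) then 1 else 0)
              + (if e = ((r, c), (r + 1, c)) then 1 else 0)
              + (if e = ((r, c + 1), (r + 1, c + 1)) then 1 else 0)) := by
      refine List.map_congr_left (fun e _ => ?_)
      rw [List.count_filter hpin, pvRaw_count]
      exact pvInd_or e _ _ _ _ hdistinct1 hdistinct2 hdistinct3 hdistinct4 hdistinct5 hdistinct6
    rw [hmapeq, pvSum_add, pvSum_add, pvSum_add]
    rw [pvSum_ind_single _ (PySem.List.nodup_dedup E), pvSum_ind_single _ (PySem.List.nodup_dedup E),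
      pvSum_ind_single _ (PySem.List.nodup_dedup E), pvSum_ind_single _ (PySem.List.nodup_dedup E)]
    simp only [PySem.List.mem_dedup]
  rw [hcount, pvCountA]
  push_cast [apply_ite (fun n : Nat => (n : Int))]
  omega

-- ===== VERDICT (by name: the statement is the Claim_ definition above) =====
theorem build_full_clues_py_spec : Claim_equal_build_full_clues_py := by
  intro rows cols E _
  unfold Spec_build_full_clues_py
  rw [pvA_eq, pvB_eq]
  exact List.map_congr_left (fun p hp => by rw [pvCount_eq rows cols E p hp])
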